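-- pv_equiv track=rewrite | github.com/saaly182/AdventOfCode | 2024/d01/d01.py | part2
-- ===== SOURCE A (Python) =====
-- import collections
--
-- def part2(left: tuple, right: tuple) -> int:
--     right_counts = collections.defaultdict(int)
--     similarity_score = 0
--
--     for n in right:
--         right_counts[n] += 1
--     for n in left:
--         if n in right_counts:
--             similarity_score += n * right_counts[n]
--
--     return similarity_score
-- ===== SOURCE B (Python) =====
-- def part2(left: tuple, right: tuple) -> int:
--     # Two-pointer merge over the two sorted lists: advance the smaller cursor;
--     # on a match, count the run of equal values in the right list and add
--     # left_value * run_length, advancing the left cursor by one.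
--     sl = sorted(left)
--     sr = sorted(right)
--     total = 0
--     i = j = 0
--     while i < len(sl) and j < len(sr):
--         if sl[i] < sr[j]:
--             i += 1
--         elif sr[j] < sl[i]:
--             j += 1
--         else:
--             run = j
--             while run < len(sr) and sr[run] == sl[i]:
--                 run += 1
--             total += sl[i] * (run - j)
--             i += 1
--     return total
-- ===== Notes on version B (the rewrite author's own statement) =====
-- stated objective: alternative
-- what changed: Replaces the hash-map counting pass with a sort of both lists followed by a two-pointer merge that advances the smaller cursor and, on a match, multiplies the left value by the length of the equal run in the right list.
import Mathlib
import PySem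

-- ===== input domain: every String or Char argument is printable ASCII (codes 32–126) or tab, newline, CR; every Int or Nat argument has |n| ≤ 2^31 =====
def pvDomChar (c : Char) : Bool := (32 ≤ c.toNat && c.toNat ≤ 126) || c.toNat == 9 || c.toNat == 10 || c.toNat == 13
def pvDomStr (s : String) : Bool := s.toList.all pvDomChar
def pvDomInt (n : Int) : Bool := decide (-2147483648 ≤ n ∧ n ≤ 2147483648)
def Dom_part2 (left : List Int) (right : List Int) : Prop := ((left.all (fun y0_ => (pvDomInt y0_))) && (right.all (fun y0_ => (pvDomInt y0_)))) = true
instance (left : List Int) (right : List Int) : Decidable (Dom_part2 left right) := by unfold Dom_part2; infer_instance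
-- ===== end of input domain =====

-- B replaces the hash-map counting pass by sorting both lists and a two-pointer merge: alternative algorithm.

-- ===== PORT A =====
def part2 (left : List Int) (right : List Int) : Int :=
  -- right_counts built by the first loop (defaultdict(int); right_counts[n] += 1)
  let right_counts : PySem.Dict Int Int :=
    right.foldl (fun d n => d.modify n 0 (· + 1)) PySem.Dict.empty
  -- second loop accumulating similarity_score
  left.foldl (fun similarity_score n =>
    if right_counts.contains n then similarity_score + n * right_counts.getD n 0
    else similarity_score) 0

-- ===== PORT B =====
-- the two-pointer while loop of Source B: heads are the cursors, advancing a cursor = dropping a head;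
-- the inner run-counting loop is the takeWhile over the rest of the right list
def pvMerge : List Int → List Int → Int
  | [], _ => 0
  | _ :: _, [] => 0
  | x :: xs, y :: ys =>
    if x < y then pvMerge xs (y :: ys)
    else if y < x then pvMerge (x :: xs) ys
    else x * (1 + ((ys.takeWhile (fun z => z == y)).length : Int)) + pvMerge xs (y :: ys)
termination_by a b => a.length + b.length

def part2_alt (left : List Int) (right : List Int) : Int :=
  pvMerge (PySem.List.sorted left (fun v => v) false) (PySem.List.sorted right (fun v => v) false)

-- ===== PRECONDITION & SPEC =====
def Spec_part2 (left : List Int) (right : List Int) (out : Int) : Prop := out = part2_alt left right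
instance (left : List Int) (right : List Int) (out : Int) : Decidable (Spec_part2 left right out) := by unfold Spec_part2; infer_instance

-- ===== CLAIM (what is proved, stated in full; the proofs are below) =====
def Claim_equal_part2 : Prop := ∀ (left : List Int) (right : List Int), Dom_part2 left right → Spec_part2 left right (part2 left right)

-- ===== LEMMAS AND PROOFS =====

-- the A-side loop over `left`, with counter dict replaced by List.count, equals acc + Σ n * right.count n
theorem part2_foldl_eq (right : List Int) (left : List Int) (acc : Int) :
    left.foldl (fun s n =>
      if (PySem.Dict.counter right).contains n then s + n * (PySem.Dict.counter right).getD n 0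
      else s) acc
    = acc + (left.map (fun n => n * (right.count n : Int))).sum := by
  induction left generalizing acc with
  | nil => simp
  | cons x xs ih =>
    simp only [List.foldl_cons, List.map_cons, List.sum_cons]
    rw [ih]
    by_cases h : (PySem.Dict.counter right).contains x
    · simp [h, PySem.Dict.getD_counter]; ring
    · have hx : x ∉ right := by
        intro hmem
        apply h
        have := PySem.Dict.contains_iff_mem_keys (d := PySem.Dict.counter right) (k := x)
        rw [this, PySem.Dict.keys_counter]
        exact (PySem.Set.mem_ofList (xs := right) (y := x)).mpr hmem
      simp [h, List.count_eq_zero_of_not_mem hx]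

-- in a sorted list y :: ys, the run at the head captures all occurrences of y
theorem takeWhile_run_count (y : Int) (ys : List Int)
    (hs : (y :: ys).Pairwise (· ≤ ·)) :
    ((ys.takeWhile (fun z => z == y)).length : Int) = (ys.count y : Int) := by
  induction ys with
  | nil => simp
  | cons a as ih =>
    rcases List.pairwise_cons.mp hs with ⟨hy, ha⟩
    by_cases hya : a = y
    · subst hya
      have hs' : (a :: as).Pairwise (· ≤ ·) := ha
      simp only [List.takeWhile_cons, beq_self_eq_true, if_true, List.length_cons,
        List.count_cons_self]
      have := ih hs'
      push_cast at this ⊢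
      omega
    · have hlt : y < a := lt_of_le_of_ne (hy a (by simp)) (Ne.symm hya)
      have hnot : y ∉ a :: as := by
        intro hmem
        rcases List.mem_cons.mp hmem with h | h
        · exact hya h.symm
        · have := (List.pairwise_cons.mp ha).1 y h
          omega
      rw [List.count_eq_zero_of_not_mem hnot]
      simp [beq_iff_eq, hya]

-- main lemma: on sorted lists the merge computes Σ over sl of n * sr.count n
theorem pvMerge_eq_sum (sl sr : List Int)
    (hl : sl.Pairwise (· ≤ ·)) (hr : sr.Pairwise (· ≤ ·)) :
    pvMerge sl sr = (sl.map (fun n => n * (sr.count n : Int))).sum := by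
  induction sl, sr using pvMerge.induct with
  | case1 sr => simp [pvMerge]
  | case2 x xs =>
    simp [pvMerge, List.count_nil]
  | case3 x xs y ys hxy ih =>
    -- x < y : x does not occur in y :: ys
    rcases List.pairwise_cons.mp hl with ⟨hx, hxs⟩
    have hc : (y :: ys).count x = 0 := by
      apply List.count_eq_zero_of_not_mem
      intro hmem
      rcases List.mem_cons.mp hmem with h | h
      · omega
      · have := (List.pairwise_cons.mp hr).1 x h; omega
    rw [pvMerge, if_pos hxy]
    simp [ih hxs hr, hc]
  | case4 x xs y ys hxy hyx ih =>
    -- y < x : every element of x :: xs exceeds y, so counts in y :: ys equal counts in ys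
    rcases List.pairwise_cons.mp hr with ⟨hy, hys⟩
    rw [pvMerge, if_neg hxy, if_pos hyx, ih hl hys]
    congr 1
    apply List.map_congr_left
    intro n hn
    have hne : y ≠ n := by
      rcases List.mem_cons.mp hn with h | h
      · omega
      · have := (List.pairwise_cons.mp hl).1 n h; omega
    rw [List.count_cons_of_ne hne]
  | case5 x xs y ys hxy hyx ih =>
    -- x = y : add x * (full count of x in y :: ys) and advance the left cursor
    have hxyeq : x = y := le_antisymm (not_lt.mp hyx) (not_lt.mp hxy)
    rcases List.pairwise_cons.mp hl with ⟨hx, hxs⟩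
    rw [pvMerge, if_neg hxy, if_neg hyx, ih hxs hr]
    simp only [List.map_cons, List.sum_cons]
    congr 1
    rw [takeWhile_run_count y ys hr]
    subst hxyeq
    rw [List.count_cons_self]
    push_cast
    ring

-- ===== VERDICT (by name: the statement is the Claim_ definition above) =====
theorem part2_spec : Claim_equal_part2 := by
  intro left right _
  unfold Spec_part2 part2 part2_alt
  have hc : right.foldl (fun d n => d.modify n 0 (· + 1)) PySem.Dict.empty
      = PySem.Dict.counter right := (PySem.Dict.counter_eq_foldl right).symm
  simp only [hc]
  rw [part2_foldl_eq]
  rw [pvMerge_eq_sum _ _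
    (by simpa using PySem.List.sorted_pairwise (xs := left) (key := fun v => v))
    (by simpa using PySem.List.sorted_pairwise (xs := right) (key := fun v => v))]
  have hpl : (PySem.List.sorted left (fun v => v) false).Perm left :=
    PySem.List.sorted_perm ..
  have hpr : (PySem.List.sorted right (fun v => v) false).Perm right :=
    PySem.List.sorted_perm ..
  rw [List.Perm.sum_eq (List.Perm.map _ hpl)]
  simp only [zero_add]
  congr 1
  apply List.map_congr_left
  intro n _
  rw [hpr.count_eq]
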